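-- pv_equiv track=rewrite | github.com/rishabh-athreya/Kettle | extract_tasks.py | create_subtasks_for_subtask
-- ===== SOURCE A (Python) =====
-- def create_subtasks_for_subtask(subtask, source_message):
--     """Create ordered subtasks (coding, research, writing) for a subtask"""
--     subtask_str = str(subtask).lower()
--     source_str = str(source_message).lower()
--
--     # Improved keyword detection
--     coding_keywords = [
--         "code", "program", "script", "app", "application", "website", "web app",
--         "api", "database", "server", "client", "frontend", "backend", "game",
--         "function", "class", "module", "package", "library", "framework",
--         "install", "setup", "configure", "deploy", "build", "compile",
--         "test", "debug", "fix", "bug", "error", "exception", "implement",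
--         "create", "develop", "build", "make"
--     ]
--
--     research_keywords = [
--         "research", "find", "search", "look up", "investigate", "explore",
--         "study", "analyze", "examine", "review", "survey", "gather",
--         "collect", "discover", "learn about", "understand", "explore",
--         "market research", "competitor analysis", "user research", "embedding",
--         "models", "algorithms", "techniques", "methods", "approaches"
--     ]
--
--     writing_keywords = [
--         "write", "document", "report", "analysis", "summary", "review",
--         "proposal", "plan", "strategy", "documentation", "manual",
--         "guide", "tutorial", "article", "blog", "content", "copy",
--         "draft", "create document", "prepare report"
--     ]
--
--     # Score each category
--     coding_score = sum(1 for keyword in coding_keywords if keyword in subtask_str or keyword in source_str)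
--     research_score = sum(1 for keyword in research_keywords if keyword in subtask_str or keyword in source_str)
--     writing_score = sum(1 for keyword in writing_keywords if keyword in subtask_str or keyword in source_str)
--
--     # Create subtasks based on scores
--     subtasks = {"coding": [], "research": [], "writing": []}
--
--     # If research keywords are found, prioritize research
--     if research_score > 0:
--         subtasks["research"] = [f"Research {subtask}"]
--         # If there are also coding keywords, add coding task
--         if coding_score > 0:
--             subtasks["coding"] = [f"Implement {subtask}"]
--         # If there are also writing keywords, add writing task
--         if writing_score > 0:
--             subtasks["writing"] = [f"Write {subtask}"]
--     # If coding keywords are found, prioritize coding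
--     elif coding_score > 0:
--         subtasks["coding"] = [f"Implement {subtask}"]
--         # If there are also writing keywords, add writing task
--         if writing_score > 0:
--             subtasks["writing"] = [f"Write {subtask}"]
--     # If writing keywords are found, prioritize writing
--     elif writing_score > 0:
--         subtasks["writing"] = [f"Write {subtask}"]
--         # Research is often needed for writing
--         subtasks["research"] = [f"Research for {subtask}"]
--     # Default fallback - if no clear category, assume it's a general task that needs research
--     else:
--         # For general tasks, start with research
--         subtasks["research"] = [f"Research {subtask}"]
--         subtasks["coding"] = [f"Implement {subtask}"]
--
--     return subtasks
-- ===== SOURCE B (Python) =====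
-- # Table-driven re-implementation: three booleans + an 8-row table, dict built in one shot.
--
-- CODING_KEYWORDS = [
--     "code", "program", "script", "app", "application", "website", "web app",
--     "api", "database", "server", "client", "frontend", "backend", "game",
--     "function", "class", "module", "package", "library", "framework",
--     "install", "setup", "configure", "deploy", "build", "compile",
--     "test", "debug", "fix", "bug", "error", "exception", "implement",
--     "create", "develop", "build", "make"
-- ]
--
-- RESEARCH_KEYWORDS = [
--     "research", "find", "search", "look up", "investigate", "explore",
--     "study", "analyze", "examine", "review", "survey", "gather",
--     "collect", "discover", "learn about", "understand", "explore",
--     "market research", "competitor analysis", "user research", "embedding",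
--     "models", "algorithms", "techniques", "methods", "approaches"
-- ]
--
-- WRITING_KEYWORDS = [
--     "write", "document", "report", "analysis", "summary", "review",
--     "proposal", "plan", "strategy", "documentation", "manual",
--     "guide", "tutorial", "article", "blog", "content", "copy",
--     "draft", "create document", "prepare report"
-- ]
--
-- # (has_research, has_coding, has_writing) -> (research prefix or None, emit coding?, emit writing?)
-- TABLE = {
--     (True,  True,  True):  ("Research ",     True,  True),
--     (True,  True,  False): ("Research ",     True,  False),
--     (True,  False, True):  ("Research ",     False, True),
--     (True,  False, False): ("Research ",     False, False),
--     (False, True,  True):  (None,            True,  True),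
--     (False, True,  False): (None,            True,  False),
--     (False, False, True):  ("Research for ", False, True),
--     (False, False, False): ("Research ",     True,  False),
-- }
--
--
-- def create_subtasks_for_subtask(subtask, source_message):
--     """Create ordered subtasks (coding, research, writing) for a subtask"""
--     subtask_str = str(subtask).lower()
--     source_str = str(source_message).lower()
--
--     def hit(keywords):
--         return any(kw in subtask_str or kw in source_str for kw in keywords)
--
--     key = (hit(RESEARCH_KEYWORDS), hit(CODING_KEYWORDS), hit(WRITING_KEYWORDS))
--     research_prefix, emit_coding, emit_writing = TABLE[key]
--
--     return {
--         "coding": [f"Implement {subtask}"] if emit_coding else [],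
--         "research": [f"{research_prefix}{subtask}"] if research_prefix is not None else [],
--         "writing": [f"Write {subtask}"] if emit_writing else [],
--     }
-- ===== Notes on version B (the rewrite author's own statement) =====
-- stated objective: simpler
-- what changed: Replaces keyword counting plus a nested if/elif cascade with three boolean any() checks and an explicit 8-row table keyed by (has_research, has_coding, has_writing), building the result dict in one expression.
import Mathlib
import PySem

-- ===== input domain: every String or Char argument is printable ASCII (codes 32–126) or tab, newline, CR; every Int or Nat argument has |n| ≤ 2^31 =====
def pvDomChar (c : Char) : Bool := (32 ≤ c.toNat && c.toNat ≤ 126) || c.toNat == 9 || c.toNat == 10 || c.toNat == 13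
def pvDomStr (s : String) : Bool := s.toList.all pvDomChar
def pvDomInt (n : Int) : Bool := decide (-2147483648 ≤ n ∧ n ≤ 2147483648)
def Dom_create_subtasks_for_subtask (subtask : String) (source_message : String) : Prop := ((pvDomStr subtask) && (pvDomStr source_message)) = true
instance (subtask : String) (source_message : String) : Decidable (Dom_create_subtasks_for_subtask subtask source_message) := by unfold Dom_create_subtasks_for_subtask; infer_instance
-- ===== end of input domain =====

-- B replaces keyword counting plus a nested if/elif cascade with three boolean `any` checks
-- and an explicit 8-row table keyed by (has_research, has_coding, has_writing): simpler.

-- ===== PORT A =====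

def codingKeywords : List String := [
  "code", "program", "script", "app", "application", "website", "web app",
  "api", "database", "server", "client", "frontend", "backend", "game",
  "function", "class", "module", "package", "library", "framework",
  "install", "setup", "configure", "deploy", "build", "compile",
  "test", "debug", "fix", "bug", "error", "exception", "implement",
  "create", "develop", "build", "make"]

def researchKeywords : List String := [
  "research", "find", "search", "look up", "investigate", "explore",
  "study", "analyze", "examine", "review", "survey", "gather",
  "collect", "discover", "learn about", "understand", "explore",
  "market research", "competitor analysis", "user research", "embedding",
  "models", "algorithms", "techniques", "methods", "approaches"]

def writingKeywords : List String := [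
  "write", "document", "report", "analysis", "summary", "review",
  "proposal", "plan", "strategy", "documentation", "manual",
  "guide", "tutorial", "article", "blog", "content", "copy",
  "draft", "create document", "prepare report"]

def create_subtasks_for_subtask (subtask : String) (source_message : String) : List (String × List String) :=
  let subtask_str := PySem.Str.lower subtask
  let source_str := PySem.Str.lower source_message
  -- sum(1 for keyword in kws if keyword in subtask_str or keyword in source_str)
  let coding_score : Nat := codingKeywords.countP
    (fun kw => PySem.Str.isIn kw subtask_str || PySem.Str.isIn kw source_str)
  let research_score : Nat := researchKeywords.countP
    (fun kw => PySem.Str.isIn kw subtask_str || PySem.Str.isIn kw source_str)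
  let writing_score : Nat := writingKeywords.countP
    (fun kw => PySem.Str.isIn kw subtask_str || PySem.Str.isIn kw source_str)
  let subtasks : PySem.Dict String (List String) :=
    PySem.Dict.ofList [("coding", []), ("research", []), ("writing", [])]
  let subtasks :=
    if 0 < research_score then
      let subtasks := subtasks.insert "research" ["Research " ++ subtask]
      let subtasks := if 0 < coding_score then subtasks.insert "coding" ["Implement " ++ subtask] else subtasks
      if 0 < writing_score then subtasks.insert "writing" ["Write " ++ subtask] else subtasks
    else if 0 < coding_score then
      let subtasks := subtasks.insert "coding" ["Implement " ++ subtask]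
      if 0 < writing_score then subtasks.insert "writing" ["Write " ++ subtask] else subtasks
    else if 0 < writing_score then
      (subtasks.insert "writing" ["Write " ++ subtask]).insert "research" ["Research for " ++ subtask]
    else
      (subtasks.insert "research" ["Research " ++ subtask]).insert "coding" ["Implement " ++ subtask]
  subtasks.items

-- ===== PORT B =====

-- TABLE of Source B: (has_research, has_coding, has_writing) -> (research prefix or None, emit coding?, emit writing?)
def subtaskTable : PySem.Dict (Bool × Bool × Bool) (Option String × Bool × Bool) :=
  PySem.Dict.ofList [
    ((true,  true,  true ), (some "Research ",     true,  true )),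
    ((true,  true,  false), (some "Research ",     true,  false)),
    ((true,  false, true ), (some "Research ",     false, true )),
    ((true,  false, false), (some "Research ",     false, false)),
    ((false, true,  true ), (none,                 true,  true )),
    ((false, true,  false), (none,                 true,  false)),
    ((false, false, true ), (some "Research for ", false, true )),
    ((false, false, false), (some "Research ",     true,  false))]

def create_subtasks_for_subtask_alt (subtask : String) (source_message : String) : List (String × List String) :=
  let subtask_str := PySem.Str.lower subtask
  let source_str := PySem.Str.lower source_message
  let hit : List String → Bool :=
    fun keywords => keywords.any (fun kw => PySem.Str.isIn kw subtask_str || PySem.Str.isIn kw source_str)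
  let key := (hit researchKeywords, hit codingKeywords, hit writingKeywords)
  -- TABLE[key]: the table is total on Bool³, so the lookup always succeeds; default unreachable
  let row := subtaskTable.getD key (none, false, false)
  -- dict literal with three distinct keys, returned as an association list in that order
  [("coding",   if row.2.1 then ["Implement " ++ subtask] else []),
   ("research", match row.1 with | some p => [p ++ subtask] | none => []),
   ("writing",  if row.2.2 then ["Write " ++ subtask] else [])]

-- ===== PRECONDITION & SPEC =====

def Spec_create_subtasks_for_subtask (subtask : String) (source_message : String) (out : List (String × List String)) : Prop := out = create_subtasks_for_subtask_alt subtask source_message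
instance (subtask : String) (source_message : String) (out : List (String × List String)) : Decidable (Spec_create_subtasks_for_subtask subtask source_message out) := by unfold Spec_create_subtasks_for_subtask; infer_instance

-- ===== CLAIM =====

def Claim_equal_create_subtasks_for_subtask : Prop := ∀ (subtask : String) (source_message : String), Dom_create_subtasks_for_subtask subtask source_message → Spec_create_subtasks_for_subtask subtask source_message (create_subtasks_for_subtask subtask source_message)

-- ===== LEMMAS AND PROOFS =====

-- A's 'score > 0' test coincides with B's 'any' test
theorem countP_pos_iff_any {α : Type} (l : List α) (q : α → Bool) :
    (0 < l.countP q) ↔ l.any q = true := by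
  rw [List.countP_pos_iff, List.any_eq_true]

set_option maxHeartbeats 1600000 in
theorem create_subtasks_spec' (subtask source_message : String) :
    create_subtasks_for_subtask subtask source_message
      = create_subtasks_for_subtask_alt subtask source_message := by
  unfold create_subtasks_for_subtask create_subtasks_for_subtask_alt
  simp only [countP_pos_iff_any]
  by_cases hR : (researchKeywords.any (fun kw => PySem.Str.isIn kw (PySem.Str.lower subtask) || PySem.Str.isIn kw (PySem.Str.lower source_message))) = true <;>
  by_cases hC : (codingKeywords.any (fun kw => PySem.Str.isIn kw (PySem.Str.lower subtask) || PySem.Str.isIn kw (PySem.Str.lower source_message))) = true <;>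
  by_cases hW : (writingKeywords.any (fun kw => PySem.Str.isIn kw (PySem.Str.lower subtask) || PySem.Str.isIn kw (PySem.Str.lower source_message))) = true <;>
  · simp only [Bool.not_eq_true] at *
    simp only [hR, hC, hW]
    simp [subtaskTable, PySem.Dict.ofList, PySem.Dict.update, PySem.Dict.empty,
      PySem.Dict.insert, PySem.Dict.contains, PySem.Dict.getD,
      PySem.Dict.get?, List.find?]
    all_goals (and_intros <;> rfl)

-- ===== VERDICT =====

theorem create_subtasks_for_subtask_spec : Claim_equal_create_subtasks_for_subtask := by
  intro subtask source_message _
  exact create_subtasks_spec' subtask source_message
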